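-- pv_equiv track=rewrite | github.com/score-json/json | TSF/scripts/generate_list_of_tests.py | remove_and_count_indent
-- ===== SOURCE A (Python) =====
-- def remove_and_count_indent(s: str) -> tuple[int, str]:
--     # input: string with possibly leading whitespace (space of horizontal tab)
--     # output: the number of leading spaces and the string with leading whitespace removed;
--     # tab counted as four spaces
--     cnt = 0
--     i = 0
--     n = len(s)
--     while i < n and (s[i] == " " or s[i] == "\t"):
--         if s[i] == " ":
--             cnt += 1
--         elif s[i] == "\t":
--             cnt += 4
--         i += 1
--     return (cnt, s[i:])
-- ===== SOURCE B (Python) =====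
-- def remove_and_count_indent(s: str) -> tuple[int, str]:
--     # Find the boundary with lstrip, then count spaces/tabs in the prefix.
--     stripped = s.lstrip(" \t")
--     prefix = s[:len(s) - len(stripped)]
--     return (prefix.count(" ") + 4 * prefix.count("\t"), stripped)
-- ===== Notes on version B (the rewrite author's own statement) =====
-- stated objective: idiomatic
-- what changed: Replaces A's fused index/while scan (one loop that both counts and finds the boundary) with a library lstrip to find the boundary, then two count passes over the whitespace prefix.
import Mathlib
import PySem

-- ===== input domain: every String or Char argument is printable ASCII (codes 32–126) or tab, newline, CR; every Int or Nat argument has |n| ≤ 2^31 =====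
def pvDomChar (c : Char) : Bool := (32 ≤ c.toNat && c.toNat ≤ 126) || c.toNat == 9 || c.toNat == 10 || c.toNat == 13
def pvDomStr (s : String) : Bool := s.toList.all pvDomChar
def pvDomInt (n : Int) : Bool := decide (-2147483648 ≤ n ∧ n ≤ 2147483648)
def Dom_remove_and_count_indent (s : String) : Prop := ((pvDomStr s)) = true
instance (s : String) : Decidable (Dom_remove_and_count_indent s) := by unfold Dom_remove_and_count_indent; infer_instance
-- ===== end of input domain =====

-- B replaces A's fused index/while scan by a library lstrip boundary step plus two counting passes over the prefix (objective: idiomatic).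

-- ===== PORT A =====
-- A's while loop over index i with accumulator cnt, as structural recursion on the remaining characters
def racLoopA : List Char → Int → Int × List Char
  | [], cnt => (cnt, [])
  | c :: rest, cnt =>
    if c == ' ' then racLoopA rest (cnt + 1)
    else if c == '\t' then racLoopA rest (cnt + 4)
    else (cnt, c :: rest)

def remove_and_count_indent (s : String) : Int × String :=
  let r := racLoopA s.toList 0
  (r.1, String.ofList r.2)

-- ===== PORT B =====
def remove_and_count_indent_alt (s : String) : Int × String :=
  let cs := s.toList
  -- s.lstrip(" \t"): drop the leading characters that lie in {' ', '\t'} (exact hand port of str.lstrip with a charset)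
  let stripped := cs.dropWhile (fun c => c == ' ' || c == '\t')
  -- prefix = s[:len(s) - len(stripped)]
  let pre := PySem.List.slice cs none (some ((cs.length : Int) - (stripped.length : Int)))
  ((PySem.Chars.count pre [' '] : Int) + 4 * (PySem.Chars.count pre ['\t'] : Int), String.ofList stripped)

-- ===== PRECONDITION & SPEC =====
def Spec_remove_and_count_indent (s : String) (out : Int × String) : Prop := out = remove_and_count_indent_alt s
instance (s : String) (out : Int × String) : Decidable (Spec_remove_and_count_indent s out) := by unfold Spec_remove_and_count_indent; infer_instance

-- ===== CLAIM (what is proved, stated in full; the proofs are below) =====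
def Claim_equal_remove_and_count_indent : Prop := ∀ (s : String), Dom_remove_and_count_indent s → Spec_remove_and_count_indent s (remove_and_count_indent s)

-- ===== LEMMAS AND PROOFS =====

theorem racCountGo_single (c : Char) (fuel : Nat) :
    ∀ (cs : List Char) (acc : Nat), cs.length ≤ fuel →
      PySem.Chars.count.go [c] fuel cs acc = acc + cs.count c := by
  induction fuel with
  | zero =>
    intro cs acc h
    have : cs = [] := List.eq_nil_of_length_eq_zero (Nat.le_zero.mp h)
    subst this
    simp [PySem.Chars.count.go]
  | succ f ih =>
    intro cs acc h
    cases cs with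
    | nil => simp [PySem.Chars.count.go]
    | cons x t =>
      unfold PySem.Chars.count.go
      by_cases hx : c = x
      · subst hx
        have hp : [c].isPrefixOf (c :: t) = true := by simp [List.isPrefixOf]
        simp only [hp, if_true, List.length_singleton, List.drop_one, List.tail_cons]
        rw [ih t (acc + 1) (by simpa using Nat.le_of_succ_le_succ h)]
        simp
        omega
      · have hp : [c].isPrefixOf (x :: t) = false := by
          simp [List.isPrefixOf]
          exact hx
        simp only [hp]
        rw [if_neg (by simp)]
        rw [ih t acc (by simpa using Nat.le_of_succ_le_succ h)]
        simp [List.count_cons]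
        intro hxx
        exact absurd hxx.symm hx

theorem racCount_single (cs : List Char) (c : Char) :
    PySem.Chars.count cs [c] = cs.count c := by
  unfold PySem.Chars.count
  simp only [List.isEmpty_iff, if_neg (by simp : ¬([c] = []))]
  simpa using racCountGo_single c cs.length cs 0 (le_refl _)

theorem racLoopA_eq (cs : List Char) (cnt : Int) :
    racLoopA cs cnt =
      (cnt + ((cs.takeWhile (fun c => c == ' ' || c == '\t')).count ' ' : Int)
           + 4 * ((cs.takeWhile (fun c => c == ' ' || c == '\t')).count '\t' : Int),
       cs.dropWhile (fun c => c == ' ' || c == '\t')) := by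
  induction cs generalizing cnt with
  | nil => simp [racLoopA]
  | cons c rest ih =>
    by_cases hs : c = ' '
    · subst hs
      simp [racLoopA, List.takeWhile, List.dropWhile, ih]
      ring
    · by_cases ht : c = '\t'
      · subst ht
        simp [racLoopA, List.takeWhile, List.dropWhile, ih]
        ring
      · have hb : (c == ' ' || c == '\t') = false := by simp [hs, ht]
        simp [racLoopA, hb, hs, ht]

-- ===== VERDICT (by name: the statement is the Claim_ definition above) =====
theorem remove_and_count_indent_spec : Claim_equal_remove_and_count_indent := by
  intro s _
  unfold Spec_remove_and_count_indent remove_and_count_indent remove_and_count_indent_alt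
  have hsplit := List.takeWhile_append_dropWhile (p := fun c => c == ' ' || c == '\t') (l := s.toList)
  have hlen : (s.toList.length : Int) - ((s.toList.dropWhile (fun c => c == ' ' || c == '\t')).length : Int)
      = ((s.toList.takeWhile (fun c => c == ' ' || c == '\t')).length : Int) := by
    have h2 : (s.toList.takeWhile (fun c => c == ' ' || c == '\t')).length
        + (s.toList.dropWhile (fun c => c == ' ' || c == '\t')).length = s.toList.length := by
      conv_rhs => rw [← hsplit]
      exact (List.length_append).symm
    omega
  have hpre : PySem.List.slice s.toList none (some ((s.toList.length : Int) - ((s.toList.dropWhile (fun c => c == ' ' || c == '\t')).length : Int)))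
      = s.toList.takeWhile (fun c => c == ' ' || c == '\t') := by
    rw [hlen]
    have := PySem.List.slice_to_natCast (xs := s.toList) (b := (s.toList.takeWhile (fun c => c == ' ' || c == '\t')).length)
    rw [this]
    exact (List.prefix_iff_eq_take.mp (List.takeWhile_prefix _)).symm
  simp only [racLoopA_eq, hpre, racCount_single]
  ring_nf
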